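-- pv_equiv track=rewrite | github.com/sigpwny/UIUCTF-2025-Public | challenges/rev/launch_sequence/solve.py | apply_xy
-- ===== SOURCE A (Python) =====
-- import copy
--
-- WIDTH = 5
--
-- def apply_xy(board, tetro, x, y):
--     board = copy.deepcopy(board)
--     for dy, row in enumerate(tetro):
--         for dx, b in enumerate(row):
--             x2 = x + dx
--             y2 = y + dy
--             if b:
--                 board[y2][x2] = b
--     while [1] * WIDTH in board:
--         board.remove([1] * WIDTH)
--         board = [[0] * WIDTH] + board
--     return board
-- ===== SOURCE B (Python) =====
-- import copy
--
-- WIDTH = 5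
--
-- def apply_xy(board, tetro, x, y):
--     board = copy.deepcopy(board)
--     for y2, row in enumerate(tetro, y):
--         for x2, b in enumerate(row, x):
--             if b:
--                 board[y2][x2] = b
--     full = [1] * WIDTH
--     kept = [r for r in board if r != full]
--     n = len(board) - len(kept)
--     return [[0] * WIDTH for _ in range(n)] + kept
-- ===== Notes on version B (the rewrite author's own statement) =====
-- stated objective: simpler
-- what changed: The repeated `while full in board: remove; prepend` clearing loop (which rescans the board for every full row) is replaced by a single filtering pass that keeps the non-full rows and pads the top with that many fresh empty rows; the placement loop carries the absolute coordinates directly via enumerate's start offset instead of adding dx/dy each step.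
import Mathlib
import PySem

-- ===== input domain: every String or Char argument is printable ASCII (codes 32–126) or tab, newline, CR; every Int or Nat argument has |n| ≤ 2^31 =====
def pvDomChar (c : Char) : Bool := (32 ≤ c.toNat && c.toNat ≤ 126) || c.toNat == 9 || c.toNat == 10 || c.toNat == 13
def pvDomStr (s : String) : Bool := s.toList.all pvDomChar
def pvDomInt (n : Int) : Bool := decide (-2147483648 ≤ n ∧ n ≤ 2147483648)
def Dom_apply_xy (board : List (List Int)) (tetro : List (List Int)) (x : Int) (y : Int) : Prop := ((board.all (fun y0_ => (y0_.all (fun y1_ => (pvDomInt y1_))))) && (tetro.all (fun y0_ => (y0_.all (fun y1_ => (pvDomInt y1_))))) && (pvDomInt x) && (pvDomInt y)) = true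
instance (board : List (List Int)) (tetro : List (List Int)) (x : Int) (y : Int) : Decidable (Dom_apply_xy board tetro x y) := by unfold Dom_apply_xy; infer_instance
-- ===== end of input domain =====

-- B replaces A's repeated while/remove/prepend row-clearing loop by one filtering pass
-- plus a pad of fresh empty rows (simpler, one pass); the placement double loop is kept
-- but carries absolute coordinates via enumerate's start offset.

-- ===== PORT A =====
-- the `while [1]*WIDTH in board: board.remove(...); board = [[0]*WIDTH] + board` loop
def clearLoopA (board : List (List Int)) : List (List Int) :=
  if h : (List.replicate 5 (1 : Int)) ∈ board then
    clearLoopA (List.replicate 5 (0 : Int) :: board.erase (List.replicate 5 (1 : Int)))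
  else board
termination_by board.count (List.replicate 5 (1 : Int))
decreasing_by
  simp
  simpa using h

def apply_xy (board : List (List Int)) (tetro : List (List Int)) (x : Int) (y : Int) : List (List Int) :=
  let placed := (PySem.List.enumerate tetro 0).foldl (fun bd p =>
    (PySem.List.enumerate p.2 0).foldl (fun bd q =>
      let x2 := x + q.1
      let y2 := y + p.1
      if q.2 ≠ 0 then
        PySem.List.pySetD bd y2 (PySem.List.pySetD (PySem.List.pyGetD bd y2 []) x2 q.2)
      else bd) bd) board
  clearLoopA placed

-- ===== PORT B =====
def apply_xy_alt (board : List (List Int)) (tetro : List (List Int)) (x : Int) (y : Int) : List (List Int) :=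
  let placed := (PySem.List.enumerate tetro y).foldl (fun bd p =>
    (PySem.List.enumerate p.2 x).foldl (fun bd q =>
      if q.2 ≠ 0 then
        PySem.List.pySetD bd p.1 (PySem.List.pySetD (PySem.List.pyGetD bd p.1 []) q.1 q.2)
      else bd) bd) board
  let full := List.replicate 5 (1 : Int)
  let kept := placed.filter (fun r => r != full)
  List.replicate (placed.length - kept.length) (List.replicate 5 (0 : Int)) ++ kept

-- ===== PRECONDITION & SPEC =====
-- Pre_ excludes exactly the inputs where Python A raises IndexError: a nonzero tetromino
-- cell whose target row or column index is out of range for the board.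
def Pre_apply_xy (board : List (List Int)) (tetro : List (List Int)) (x : Int) (y : Int) : Prop :=
  ∀ p ∈ PySem.List.enumerate tetro 0, ∀ q ∈ PySem.List.enumerate p.2 0, q.2 ≠ 0 →
    PySem.Raise.InRange board.length (y + p.1) ∧
    PySem.Raise.InRange (PySem.List.pyGetD board (y + p.1) []).length (x + q.1)
instance (board : List (List Int)) (tetro : List (List Int)) (x : Int) (y : Int) : Decidable (Pre_apply_xy board tetro x y) := by unfold Pre_apply_xy; infer_instance

def pvWitness_apply_xy : List (List Int) × List (List Int) × Int × Int :=
  ([[0, 0, 0, 0, 0], [0, 1, 0, 1, 1]], [[1, 0, 1]], 0, 1)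

def Spec_apply_xy (board : List (List Int)) (tetro : List (List Int)) (x : Int) (y : Int) (out : List (List Int)) : Prop := out = apply_xy_alt board tetro x y
instance (board : List (List Int)) (tetro : List (List Int)) (x : Int) (y : Int) (out : List (List Int)) : Decidable (Spec_apply_xy board tetro x y out) := by unfold Spec_apply_xy; infer_instance

-- ===== CLAIM (what is proved, stated in full; the proofs are below) =====
def Claim_equal_apply_xy : Prop := ∀ (board : List (List Int)) (tetro : List (List Int)) (x : Int) (y : Int), Dom_apply_xy board tetro x y → Pre_apply_xy board tetro x y → Spec_apply_xy board tetro x y (apply_xy board tetro x y)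

-- ===== LEMMAS AND PROOFS =====

theorem pvWitness_ok :
    Dom_apply_xy (pvWitness_apply_xy.1) (pvWitness_apply_xy.2.1) (pvWitness_apply_xy.2.2.1) (pvWitness_apply_xy.2.2.2) ∧
    Pre_apply_xy (pvWitness_apply_xy.1) (pvWitness_apply_xy.2.1) (pvWitness_apply_xy.2.2.1) (pvWitness_apply_xy.2.2.2) := by
  decide

-- enumerate with start s+t is enumerate with start t, indices shifted by s
theorem enumerate_start_shift {α : Type} (xs : List α) (s t : Int) :
    PySem.List.enumerate xs (s + t) = (PySem.List.enumerate xs t).map (fun p => (s + p.1, p.2)) := by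
  induction xs generalizing t with
  | nil => simp [PySem.List.enumerate_nil]
  | cons a xs ih =>
    simp only [PySem.List.enumerate_cons, List.map_cons]
    rw [show s + t + 1 = s + (t + 1) by ring, ih]

theorem foldl_ext {α β : Type} (f g : β → α → β) (l : List α) (b : β)
    (h : ∀ b a, f b a = g b a) : l.foldl f b = l.foldl g b := by
  induction l generalizing b with
  | nil => rfl
  | cons a l ih => simp only [List.foldl_cons, h, ih]

-- the two placement folds compute the same board
theorem placed_eq (board : List (List Int)) (tetro : List (List Int)) (x y : Int) :
    (PySem.List.enumerate tetro y).foldl (fun bd p =>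
      (PySem.List.enumerate p.2 x).foldl (fun bd q =>
        if q.2 ≠ 0 then
          PySem.List.pySetD bd p.1 (PySem.List.pySetD (PySem.List.pyGetD bd p.1 []) q.1 q.2)
        else bd) bd) board
    = (PySem.List.enumerate tetro 0).foldl (fun bd p =>
      (PySem.List.enumerate p.2 0).foldl (fun bd q =>
        if q.2 ≠ 0 then
          PySem.List.pySetD bd (y + p.1) (PySem.List.pySetD (PySem.List.pyGetD bd (y + p.1) []) (x + q.1) q.2)
        else bd) bd) board := by
  have h1 : PySem.List.enumerate tetro y = (PySem.List.enumerate tetro 0).map (fun p => (y + p.1, p.2)) := by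
    simpa using enumerate_start_shift tetro y 0
  rw [h1, List.foldl_map]
  apply foldl_ext
  intro bd p
  have h2 : PySem.List.enumerate p.2 x = (PySem.List.enumerate p.2 0).map (fun q => (x + q.1, q.2)) := by
    simpa using enumerate_start_shift p.2 x 0
  rw [h2, List.foldl_map]

theorem filter_erase_full (l : List (List Int)) :
    (l.erase (List.replicate 5 (1 : Int))).filter (fun r => r != List.replicate 5 (1 : Int))
    = l.filter (fun r => r != List.replicate 5 (1 : Int)) := by
  induction l with
  | nil => simp
  | cons a l ih =>
    by_cases h : a = List.replicate 5 (1 : Int)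
    · subst h; simp
    · rw [List.erase_cons_tail (by simpa using h)]
      simp only [List.filter_cons]
      rw [ih]

theorem clearLoopA_eq (bd : List (List Int)) :
    clearLoopA bd = List.replicate (bd.length - (bd.filter (fun r => r != List.replicate 5 (1 : Int))).length) (List.replicate 5 (0 : Int)) ++ bd.filter (fun r => r != List.replicate 5 (1 : Int)) := by
  have e1 : (List.replicate 5 (1 : Int)) = [1, 1, 1, 1, 1] := rfl
  have e0 : (List.replicate 5 (0 : Int)) = [0, 0, 0, 0, 0] := rfl
  rw [e1, e0]
  suffices H : ∀ n (bd : List (List Int)), bd.count ([1, 1, 1, 1, 1] : List Int) = n →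
      clearLoopA bd = List.replicate (bd.length - (bd.filter (fun r => r != ([1, 1, 1, 1, 1] : List Int))).length) ([0, 0, 0, 0, 0] : List Int) ++ bd.filter (fun r => r != ([1, 1, 1, 1, 1] : List Int)) from
    H _ bd rfl
  intro n
  induction n using Nat.strong_induction_on with
  | _ n ih =>
    intro bd hn
    unfold clearLoopA
    split
    · next h =>
      rw [e1, e0]
      have h' : ([1, 1, 1, 1, 1] : List Int) ∈ bd := h
      have hpos : 0 < n := by
        rw [← hn]
        exact List.count_pos_iff.mpr h'
      have hcnt : List.count ([1, 1, 1, 1, 1] : List Int) (([0, 0, 0, 0, 0] : List Int) :: bd.erase ([1, 1, 1, 1, 1] : List Int)) = n - 1 := by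
        have hce : List.count ([1, 1, 1, 1, 1] : List Int) (bd.erase ([1, 1, 1, 1, 1] : List Int)) = List.count ([1, 1, 1, 1, 1] : List Int) bd - 1 := List.count_erase_self ..
        simp [hce]
        omega
      rw [ih (n - 1) (by omega) _ hcnt]
      have hfe : (bd.erase ([1, 1, 1, 1, 1] : List Int)).filter (fun r => r != ([1, 1, 1, 1, 1] : List Int)) = bd.filter (fun r => r != ([1, 1, 1, 1, 1] : List Int)) := filter_erase_full bd
      have hlen : (bd.erase ([1, 1, 1, 1, 1] : List Int)).length = bd.length - 1 := List.length_erase_of_mem h'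
      have hlt : (bd.filter (fun r => r != ([1, 1, 1, 1, 1] : List Int))).length < bd.length := by
        rcases List.append_of_mem h' with ⟨pre, post, rfl⟩
        have h1 := List.length_filter_le (fun r => r != ([1, 1, 1, 1, 1] : List Int)) pre
        have h2 := List.length_filter_le (fun r => r != ([1, 1, 1, 1, 1] : List Int)) post
        simp [List.filter_append]
        omega
      have hq : (([0, 0, 0, 0, 0] : List Int) :: bd.erase ([1, 1, 1, 1, 1] : List Int)).filter (fun r => r != ([1, 1, 1, 1, 1] : List Int)) = ([0, 0, 0, 0, 0] : List Int) :: bd.filter (fun r => r != ([1, 1, 1, 1, 1] : List Int)) := by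
        rw [List.filter_cons]
        simp [hfe]
      rw [hq]
      simp only [List.length_cons, hlen]
      rw [show bd.length - 1 + 1 - ((bd.filter (fun r => r != ([1, 1, 1, 1, 1] : List Int))).length + 1) = (bd.length - (bd.filter (fun r => r != ([1, 1, 1, 1, 1] : List Int))).length) - 1 from by omega]
      obtain ⟨m, hm⟩ : ∃ m, bd.length - (bd.filter (fun r => r != ([1, 1, 1, 1, 1] : List Int))).length = m + 1 := ⟨bd.length - (bd.filter (fun r => r != ([1, 1, 1, 1, 1] : List Int))).length - 1, by omega⟩
      rw [hm, Nat.add_sub_cancel, List.replicate_succ']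
      simp
    · next h =>
      have hself : bd.filter (fun r => r != ([1, 1, 1, 1, 1] : List Int)) = bd := by
        apply List.filter_eq_self.mpr
        intro a ha
        simp only [bne_iff_ne, ne_eq]
        intro hc
        exact h (by rw [e1]; exact hc ▸ ha)
      rw [hself]
      simp

-- ===== VERDICT (by name: the statement is the Claim_ definition above) =====
theorem apply_xy_spec : Claim_equal_apply_xy := by
  intro board tetro x y _ _
  show apply_xy board tetro x y = apply_xy_alt board tetro x y
  unfold apply_xy apply_xy_alt
  rw [placed_eq, clearLoopA_eq]
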